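-- pv_equiv track=rewrite | github.com/c-kick/srt-translate | scripts/vad_timing_check.py | smooth_speech_map
-- ===== SOURCE A (Python) =====
-- def smooth_speech_map(speech_map, hangover_frames=7):
--     """
--     Smooth VAD output: bridge silence gaps shorter than hangover_frames.
--     At 30ms/frame, 7 frames = 210ms — bridges word-internal pauses
--     but preserves sentence-level gaps (typically 300ms+).
--     """
--     smoothed = list(speech_map)
--     n = len(smoothed)
--     i = 0
--     while i < n:
--         if smoothed[i]:
--             # In speech — find end of this speech run
--             j = i + 1
--             while j < n and smoothed[j]:
--                 j += 1
--             # j = first silence frame after speech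
--             # Find how long the silence lasts
--             k = j
--             while k < n and not smoothed[k]:
--                 k += 1
--             # k = next speech frame (or end)
--             gap = k - j
--             if k < n and gap <= hangover_frames:
--                 # Bridge the gap
--                 for x in range(j, k):
--                     smoothed[x] = True
--                 i = k
--             else:
--                 i = j
--         else:
--             i += 1
--     return smoothed
-- ===== SOURCE B (Python) =====
-- def smooth_speech_map(speech_map, hangover_frames=7):
--     """Single forward pass: remember the index of the last speech frame and
--     bridge the silence gap behind each new speech frame when it is short enough."""
--     smoothed = list(speech_map)
--     prev = None
--     for i, v in enumerate(smoothed):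
--         if v:
--             if prev is not None and i - prev - 1 <= hangover_frames:
--                 for x in range(prev + 1, i):
--                     smoothed[x] = True
--             prev = i
--     return smoothed
-- ===== Notes on version B (the rewrite author's own statement) =====
-- stated objective: simpler
-- what changed: Replaces A's three nested index-scanning while-loops (find speech run end, measure silence, branch) with a single forward for-loop that remembers the index of the last speech frame and back-fills the gap behind each new speech frame when it is short enough.
import Mathlib
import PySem

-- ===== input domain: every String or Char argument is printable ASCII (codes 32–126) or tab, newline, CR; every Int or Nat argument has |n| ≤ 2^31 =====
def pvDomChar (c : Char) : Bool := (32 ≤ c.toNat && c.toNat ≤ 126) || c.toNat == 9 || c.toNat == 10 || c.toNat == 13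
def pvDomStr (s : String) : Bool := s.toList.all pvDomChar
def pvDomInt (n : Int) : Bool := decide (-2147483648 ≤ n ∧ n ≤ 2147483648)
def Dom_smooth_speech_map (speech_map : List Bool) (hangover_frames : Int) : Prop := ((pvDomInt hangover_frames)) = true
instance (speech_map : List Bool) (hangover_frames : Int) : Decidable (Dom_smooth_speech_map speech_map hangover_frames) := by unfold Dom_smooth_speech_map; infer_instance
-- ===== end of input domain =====

-- B replaces A's three nested index-scanning while-loops with one forward pass that
-- remembers the last speech index and back-fills short silence gaps (objective: simpler).
-- Neither implementation mutates its argument; both copy it first.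

-- ===== PORT A =====
-- both Pythons' inner `for x in range(a, b): smoothed[x] = True` fill loop
def setTrues (s : List Bool) (j k : Nat) : List Bool :=
  if j < k then setTrues (s.set j true) (j + 1) k else s
termination_by k - j
decreasing_by omega

theorem setTrues_length (s : List Bool) (j k : Nat) : (setTrues s j k).length = s.length := by
  fun_induction setTrues s j k with
  | case1 s j h ih => simpa using ih
  | case2 s j h => rfl

-- A's `while j < n and smoothed[j]: j += 1`
def scanTrue (s : List Bool) (j : Nat) : Nat :=
  if j < s.length ∧ s.getD j false = true then scanTrue s (j + 1) else j
termination_by s.length - j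
decreasing_by omega

-- A's `while k < n and not smoothed[k]: k += 1`
def scanFalse (s : List Bool) (j : Nat) : Nat :=
  if j < s.length ∧ s.getD j false = false then scanFalse s (j + 1) else j
termination_by s.length - j
decreasing_by omega

theorem le_scanTrue (s : List Bool) (j : Nat) : j ≤ scanTrue s j := by
  fun_induction scanTrue s j with
  | case1 j h ih => omega
  | case2 j h => omega

theorem le_scanFalse (s : List Bool) (j : Nat) : j ≤ scanFalse s j := by
  fun_induction scanFalse s j with
  | case1 j h ih => omega
  | case2 j h => omega

-- A's outer `while i < n` loop (state: the list copy and the index)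
def loopA (hang : Int) (s : List Bool) (i : Nat) : List Bool :=
  if hi : i < s.length then
    if s.getD i false then
      let j := scanTrue s (i + 1)
      let k := scanFalse s j
      if k < s.length ∧ ((k : Int) - (j : Int) ≤ hang) then
        loopA hang (setTrues s j k) k
      else loopA hang s j
    else loopA hang s (i + 1)
  else s
termination_by s.length - i
decreasing_by
  · have h1 := le_scanTrue s (i + 1)
    have h2 := le_scanFalse s (scanTrue s (i + 1))
    rw [setTrues_length]; omega
  · have h1 := le_scanTrue s (i + 1); omega
  · omega

def smooth_speech_map (speech_map : List Bool) (hangover_frames : Int) : List Bool :=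
  loopA hangover_frames speech_map 0

-- ===== PORT B =====
-- the body of B's `if v:` branch: conditional back-fill behind index i
def fillB (hang : Int) (s : List Bool) (i : Nat) (prev : Option Nat) : List Bool :=
  match prev with
  | some p => if (i : Int) - (p : Int) - 1 ≤ hang then setTrues s (p + 1) i else s
  | none => s

theorem fillB_length (hang : Int) (s : List Bool) (i : Nat) (prev : Option Nat) :
    (fillB hang s i prev).length = s.length := by
  unfold fillB; rcases prev with _ | p <;> simp; split <;> simp [setTrues_length]

-- B's `for i, v in enumerate(smoothed)` pass (prev = index of last speech frame)
def loopB (hang : Int) (s : List Bool) (i : Nat) (prev : Option Nat) : List Bool :=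
  if i < s.length then
    if s.getD i false then
      loopB hang (fillB hang s i prev) (i + 1) (some i)
    else loopB hang s (i + 1) prev
  else s
termination_by s.length - i
decreasing_by
  · rw [fillB_length]; omega
  · omega

def smooth_speech_map_alt (speech_map : List Bool) (hangover_frames : Int) : List Bool :=
  loopB hangover_frames speech_map 0 none

-- ===== PRECONDITION & SPEC =====
def Spec_smooth_speech_map (speech_map : List Bool) (hangover_frames : Int) (out : List Bool) : Prop := out = smooth_speech_map_alt speech_map hangover_frames
instance (speech_map : List Bool) (hangover_frames : Int) (out : List Bool) : Decidable (Spec_smooth_speech_map speech_map hangover_frames out) := by unfold Spec_smooth_speech_map; infer_instance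

-- ===== CLAIM (what is proved, stated in full; the proofs are below) =====
def Claim_equal_smooth_speech_map : Prop := ∀ (speech_map : List Bool) (hangover_frames : Int), Dom_smooth_speech_map speech_map hangover_frames → Spec_smooth_speech_map speech_map hangover_frames (smooth_speech_map speech_map hangover_frames)

-- ===== LEMMAS AND PROOFS =====

theorem scanTrue_le (s : List Bool) (j : Nat) : scanTrue s j ≤ s.length ∨ scanTrue s j = j := by
  fun_induction scanTrue s j with
  | case1 j h ih => rcases ih with h' | h' <;> [left; (left; omega)] <;> exact h'
  | case2 j h => right; rfl

theorem scanFalse_le (s : List Bool) (j : Nat) : scanFalse s j ≤ s.length ∨ scanFalse s j = j := by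
  fun_induction scanFalse s j with
  | case1 j h ih => rcases ih with h' | h' <;> [left; (left; omega)] <;> exact h'
  | case2 j h => right; rfl

theorem setTrues_stop (s : List Bool) (j k : Nat) (h : ¬ j < k) : setTrues s j k = s := by
  rw [setTrues]; simp [h]

theorem setTrues_getD_out (s : List Bool) (j k x : Nat) (h : x < j ∨ k ≤ x) :
    (setTrues s j k).getD x false = s.getD x false := by
  fun_induction setTrues s j k with
  | case1 s j h' ih =>
    rw [ih (by omega)]
    simp only [List.getD_eq_getElem?_getD, List.getElem?_set]
    have hxj : ¬ j = x := by omega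
    simp [hxj]
  | case2 s j h' => rfl

theorem setTrues_getD_mem (s : List Bool) (j k x : Nat)
    (h1 : j ≤ x) (h2 : x < k) (h3 : x < s.length) :
    (setTrues s j k).getD x false = true := by
  fun_induction setTrues s j k with
  | case1 s j h' ih =>
    by_cases hx : x = j
    · subst hx
      rw [setTrues_getD_out _ _ _ _ (Or.inl (by omega))]
      simp [List.getD_eq_getElem?_getD, List.getElem?_set, h3]
    · exact ih (by omega) (by simpa using h3)
  | case2 s j h' => omega

theorem scanTrue_mem (s : List Bool) (j x : Nat) (h1 : j ≤ x) (h2 : x < scanTrue s j) :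
    s.getD x false = true := by
  fun_induction scanTrue s j with
  | case1 j h ih =>
    by_cases hx : x = j
    · subst hx; exact h.2
    · exact ih (by omega) h2
  | case2 j h => omega

theorem scanTrue_stopv (s : List Bool) (j : Nat) (h : scanTrue s j < s.length) :
    s.getD (scanTrue s j) false = false := by
  fun_induction scanTrue s j with
  | case1 j h' ih => exact ih h
  | case2 j h' =>
    by_cases hb : s.getD j false = true
    · exact absurd ⟨h, hb⟩ h'
    · simpa using hb

theorem scanFalse_mem (s : List Bool) (j x : Nat) (h1 : j ≤ x) (h2 : x < scanFalse s j) :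
    s.getD x false = false := by
  fun_induction scanFalse s j with
  | case1 j h ih =>
    by_cases hx : x = j
    · subst hx; exact h.2
    · exact ih (by omega) h2
  | case2 j h => omega

theorem scanFalse_stopv (s : List Bool) (j : Nat) (h : scanFalse s j < s.length) :
    s.getD (scanFalse s j) false = true := by
  fun_induction scanFalse s j with
  | case1 j h' ih => exact ih h
  | case2 j h' =>
    by_cases hb : s.getD j false = false
    · exact absurd ⟨h, hb⟩ h'
    · simpa using hb

theorem getD_lt (s : List Bool) (i : Nat) (h : i < s.length) : s.getD i false = s[i] := by
  simp [List.getD_eq_getElem?_getD, List.getElem?_eq_getElem, h]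

theorem scanFalse_of_true (s : List Bool) (j : Nat) (h : s.getD j false = true) :
    scanFalse s j = j := by
  rw [scanFalse, if_neg]
  rintro ⟨h1, h2⟩
  rw [getD_lt s j h1] at h
  simp [List.getD_eq_getElem?_getD, List.getElem?_eq_getElem, h1, h] at h2

theorem scanFalse_of_ge (s : List Bool) (j : Nat) (h : ¬ j < s.length) :
    scanFalse s j = j := by
  rw [scanFalse]; simp [h]

theorem scanFalse_succ (s : List Bool) (j : Nat) (h1 : j < s.length)
    (h2 : s.getD j false = false) : scanFalse s j = scanFalse s (j + 1) := by
  have h2' : s[j] = false := by rw [← getD_lt s j h1]; exact h2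
  conv_lhs => rw [scanFalse]
  simp [h1, h2']

-- equation lemmas for the two loops
theorem loopA_end (hang : Int) (s : List Bool) (i : Nat) (h : ¬ i < s.length) :
    loopA hang s i = s := by
  rw [loopA]; simp [h]

theorem loopA_silence (hang : Int) (s : List Bool) (i : Nat) (h : i < s.length)
    (hv : s.getD i false = false) : loopA hang s i = loopA hang s (i + 1) := by
  have hv' : s[i] = false := by rw [← getD_lt s i h]; exact hv
  rw [loopA]; simp [h, hv']

theorem loopA_speech (hang : Int) (s : List Bool) (i : Nat) (h : i < s.length)
    (hv : s.getD i false = true) :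
    loopA hang s i =
      (if scanFalse s (scanTrue s (i + 1)) < s.length ∧
          ((scanFalse s (scanTrue s (i + 1)) : Int) - (scanTrue s (i + 1) : Int) ≤ hang) then
        loopA hang (setTrues s (scanTrue s (i + 1)) (scanFalse s (scanTrue s (i + 1))))
          (scanFalse s (scanTrue s (i + 1)))
      else loopA hang s (scanTrue s (i + 1))) := by
  have hv' : s[i] = true := by rw [← getD_lt s i h]; exact hv
  rw [loopA]; simp [h, hv']

theorem loopB_end (hang : Int) (s : List Bool) (i : Nat) (prev : Option Nat)
    (h : ¬ i < s.length) : loopB hang s i prev = s := by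
  rw [loopB]; simp [h]

theorem loopB_silence (hang : Int) (s : List Bool) (i : Nat) (prev : Option Nat)
    (h : i < s.length) (hv : s.getD i false = false) :
    loopB hang s i prev = loopB hang s (i + 1) prev := by
  have hv' : s[i] = false := by rw [← getD_lt s i h]; exact hv
  rw [loopB]; simp [h, hv']

theorem loopB_speech (hang : Int) (s : List Bool) (i : Nat) (prev : Option Nat)
    (h : i < s.length) (hv : s.getD i false = true) :
    loopB hang s i prev = loopB hang (fillB hang s i prev) (i + 1) (some i) := by
  have hv' : s[i] = true := by rw [← getD_lt s i h]; exact hv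
  rw [loopB]; simp [h, hv']

-- B walks through a speech run without changing the list
theorem runB (hang : Int) : ∀ (m i : Nat) (s : List Bool),
    (∀ x, i + 1 ≤ x → x < i + 1 + m → s.getD x false = true) → i + 1 + m ≤ s.length →
    loopB hang s (i + 1) (some i) = loopB hang s (i + 1 + m) (some (i + m)) := by
  intro m
  induction m with
  | zero => intro i s _ _; rfl
  | succ m ih =>
    intro i s hall hlen
    have hv : s.getD (i + 1) false = true := hall (i + 1) (by omega) (by omega)
    rw [loopB_speech hang s (i + 1) (some i) (by omega) hv]
    have hfill : fillB hang s (i + 1) (some i) = s := by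
      simp only [fillB]
      split_ifs with hc
      · exact setTrues_stop s (i + 1) (i + 1) (by omega)
      · rfl
    rw [hfill]
    have := ih (i + 1) s (by intro x hx1 hx2; exact hall x (by omega) (by omega)) (by omega)
    rw [this]
    have e1 : i + 1 + 1 + m = i + 1 + (m + 1) := by omega
    have e2 : i + 1 + m = i + (m + 1) := by omega
    rw [e1, e2]

-- B walks through silence without changing the list or prev
theorem silenceB (hang : Int) : ∀ (m i : Nat) (s : List Bool) (prev : Option Nat),
    (∀ x, i ≤ x → x < i + m → s.getD x false = false) → i + m ≤ s.length →
    loopB hang s i prev = loopB hang s (i + m) prev := by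
  intro m
  induction m with
  | zero => intro i s prev _ _; rfl
  | succ m ih =>
    intro i s prev hall hlen
    have hv : s.getD i false = false := hall i (by omega) (by omega)
    rw [loopB_silence hang s i prev (by omega) hv]
    have := ih (i + 1) s prev (by intro x hx1 hx2; exact hall x (by omega) (by omega)) (by omega)
    rw [this]
    have e1 : i + 1 + m = i + (m + 1) := by omega
    rw [e1]

theorem mainEQ (d : Nat) : ∀ (s : List Bool) (i : Nat) (prev : Option Nat) (hang : Int),
    s.length - i ≤ d → i ≤ s.length →
    (∀ p, prev = some p → p < i ∧ s.getD p false = true ∧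
      (∀ x, p < x → x < i → s.getD x false = false) ∧
      (scanFalse s i < s.length →
        p + 1 = scanFalse s i ∨ ((scanFalse s i : Int)) - p - 1 > hang)) →
    loopA hang s i = loopB hang s i prev := by
  induction d with
  | zero =>
    intro s i prev hang hd hi hinv
    have h : ¬ i < s.length := by omega
    rw [loopA_end hang s i h, loopB_end hang s i prev h]
  | succ d ih =>
    intro s i prev hang hd hi hinv
    by_cases hlt : i < s.length
    · by_cases hv : s.getD i false = true
      · -- speech frame at i: B moves to prev = some i without changing the list
        have hvB : loopB hang s i prev = loopB hang s (i + 1) (some i) := by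
          rw [loopB_speech hang s i prev hlt hv]
          have hfe : fillB hang s i prev = s := by
            rcases prev with _ | p
            · rfl
            · obtain ⟨hp1, hp2, hp3, hp4⟩ := hinv p rfl
              have hsf : scanFalse s i = i := scanFalse_of_true s i hv
              rw [hsf] at hp4
              simp only [fillB]
              split_ifs with hc
              · rcases hp4 hlt with he | hgt
                · rw [he]
                  exact setTrues_stop s i i (by omega)
                · exfalso; omega
              · rfl
          rw [hfe]
        have hj1 := le_scanTrue s (i + 1)
        have hjle : scanTrue s (i + 1) ≤ s.length := by
          rcases scanTrue_le s (i + 1) with h' | h' <;> omega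
        set j := scanTrue s (i + 1) with hjdef
        have hrunT : ∀ x, i + 1 ≤ x → x < j → s.getD x false = true :=
          fun x hx1 hx2 => scanTrue_mem s (i + 1) x hx1 hx2
        have hB2 : loopB hang s (i + 1) (some i) = loopB hang s j (some (j - 1)) := by
          have hr := runB hang (j - (i + 1)) i s
            (by intro x hx1 hx2; exact hrunT x hx1 (by omega)) (by omega)
          have e1 : i + 1 + (j - (i + 1)) = j := by omega
          have e2 : i + (j - (i + 1)) = j - 1 := by omega
          rw [e1, e2] at hr
          exact hr
        have hkj := le_scanFalse s j
        set k := scanFalse s j with hkdef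
        have hkle : k ≤ s.length := by rcases scanFalse_le s j with h' | h' <;> omega
        have hgapF : ∀ x, j ≤ x → x < k → s.getD x false = false :=
          fun x hx1 hx2 => scanFalse_mem s j x hx1 hx2
        by_cases hjn : j < s.length
        · have hjF : s.getD j false = false := by
            have h' := scanTrue_stopv s (i + 1) (by rw [← hjdef]; exact hjn)
            rw [← hjdef] at h'
            exact h'
          have hjk : j < k := by
            have h' := scanFalse_succ s j hjn hjF
            have h'' := le_scanFalse s (j + 1)
            have h3 : k = scanFalse s (j + 1) := by rw [hkdef, h']
            omega
          by_cases hfill : k < s.length ∧ ((k : Int) - (j : Int) ≤ hang)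
          · -- short gap: A bridges it now, B bridges it when it reaches k
            have hkT : s.getD k false = true := by
              have h' := scanFalse_stopv s j (by rw [← hkdef]; exact hfill.1)
              rw [← hkdef] at h'
              exact h'
            have hA : loopA hang s i = loopA hang (setTrues s j k) k := by
              rw [loopA_speech hang s i hlt hv, ← hjdef, ← hkdef, if_pos hfill]
            set s' := setTrues s j k with hs'def
            have hlen' : s'.length = s.length := by rw [hs'def]; exact setTrues_length s j k
            have hs'k : s'.getD k false = true := by
              rw [hs'def, setTrues_getD_out s j k k (Or.inr (le_refl k))]
              exact hkT
            have hbsil : loopB hang s j (some (j - 1)) = loopB hang s k (some (j - 1)) := by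
              have hr := silenceB hang (k - j) j s (some (j - 1))
                (by intro x hx1 hx2; exact hgapF x hx1 (by omega)) (by omega)
              have e1 : j + (k - j) = k := by omega
              rw [e1] at hr
              exact hr
            have hstep : loopB hang s k (some (j - 1)) = loopB hang s' (k + 1) (some k) := by
              rw [loopB_speech hang s k (some (j - 1)) hfill.1 hkT]
              congr 1
              simp only [fillB]
              rw [if_pos (by
                have e : ((k : Int) - ((j - 1 : Nat) : Int) - 1) = (k : Int) - (j : Int) := by
                  omega
                rw [e]
                exact hfill.2)]
              have e : j - 1 + 1 = j := by omega
              rw [e]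
            have hstep2 : loopB hang s' k (some (k - 1)) = loopB hang s' (k + 1) (some k) := by
              rw [loopB_speech hang s' k (some (k - 1)) (by rw [hlen']; exact hfill.1) hs'k]
              congr 1
              simp only [fillB]
              split_ifs with hc
              · have e : k - 1 + 1 = k := by omega
                rw [e]
                exact setTrues_stop s' k k (by omega)
              · rfl
            have hIH : loopA hang s' k = loopB hang s' k (some (k - 1)) := by
              apply ih s' k (some (k - 1)) hang (by omega) (by omega)
              intro p hp
              injection hp with hp
              subst hp
              refine ⟨by omega, ?_, by intro x hx1 hx2; omega, ?_⟩
              · rw [hs'def]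
                exact setTrues_getD_mem s j k (k - 1) (by omega) (by omega) (by omega)
              · intro hlt2
                left
                rw [scanFalse_of_true s' k hs'k]
                omega
            rw [hA, hIH, hstep2, hvB, hB2, hbsil, hstep]
          · -- long gap (or the list ends silent): neither bridges
            have hA : loopA hang s i = loopA hang s j := by
              rw [loopA_speech hang s i hlt hv, ← hjdef, ← hkdef, if_neg hfill]
            have hIH : loopA hang s j = loopB hang s j (some (j - 1)) := by
              apply ih s j (some (j - 1)) hang (by omega) (by omega)
              intro p hp
              injection hp with hp
              subst hp
              refine ⟨by omega, ?_, by intro x hx1 hx2; omega, ?_⟩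
              · by_cases hji : j - 1 = i
                · rw [hji]; exact hv
                · exact hrunT (j - 1) (by omega) (by omega)
              · intro hlt2
                rw [← hkdef] at hlt2 ⊢
                right
                have hnot : ¬ ((k : Int) - (j : Int) ≤ hang) := fun hx => hfill ⟨hlt2, hx⟩
                omega
            rw [hA, hIH, hvB, hB2]
        · -- the speech run reaches the end of the list
          have hjn' : j = s.length := by omega
          have hkn : k = j := by rw [hkdef]; exact scanFalse_of_ge s j hjn
          have hA : loopA hang s i = s := by
            rw [loopA_speech hang s i hlt hv, ← hjdef, ← hkdef,
              if_neg (by rintro ⟨h1, -⟩; omega)]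
            exact loopA_end hang s j (by omega)
          have hB3 : loopB hang s j (some (j - 1)) = s := loopB_end hang s j _ (by omega)
          rw [hA, hvB, hB2, hB3]
      · -- silence frame at i: both loops step over it
        have hv' : s.getD i false = false := by simpa using hv
        rw [loopA_silence hang s i hlt hv', loopB_silence hang s i prev hlt hv']
        apply ih s (i + 1) prev hang (by omega) (by omega)
        intro p hp
        obtain ⟨h1, h2, h3, h4⟩ := hinv p hp
        refine ⟨by omega, h2, ?_, ?_⟩
        · intro x hx1 hx2
          by_cases hxi : x = i
          · rw [hxi]; exact hv'
          · exact h3 x hx1 (by omega)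
        · rw [← scanFalse_succ s i hlt hv']
          exact h4
    · rw [loopA_end hang s i hlt, loopB_end hang s i prev hlt]

-- ===== VERDICT (by name: the statement is the Claim_ definition above) =====
theorem smooth_speech_map_spec : Claim_equal_smooth_speech_map := by
  intro sp hf _
  unfold Spec_smooth_speech_map smooth_speech_map smooth_speech_map_alt
  exact mainEQ sp.length sp 0 none hf (by omega) (by omega) (by intro p h; cases h)
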